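-- pv_equiv track=rewrite | github.com/BU-Spark/ml-naacp | se_ml_production/ML_LLM_Pipeline/ML_GKE/ML_Service_GKE/Model_Utils/model_Utils.py | filter_loc
-- ===== SOURCE A (Python) =====
-- def filter_loc(x):
--     res = []
--     for tup in x:
--         cleaned_tup = tup.strip().split(",")
--         if (len(cleaned_tup) >= 2):
--             if (("GPE" in cleaned_tup[1] and "Boston" not in cleaned_tup[0] and "Massachusetts" not in cleaned_tup[0])
--                 or ("ORG" in cleaned_tup[1])
--                 or ("FAC" in cleaned_tup[1])
--                 or ("LOC" in cleaned_tup[1])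
--             ):
--                 res.append((cleaned_tup[0], cleaned_tup[1].strip()))
--     priority = {'FAC': 1, 'ORG': 2, 'LOC': 3, 'GPE': 4}
--     sorted_list = sorted(res, key=lambda x: priority[x[1]])
--
--     return sorted_list
-- ===== SOURCE B (Python) =====
-- def filter_loc(x):
--     priority = {'FAC': 1, 'ORG': 2, 'LOC': 3, 'GPE': 4}
--     buckets = [[], [], [], []]
--     for tup in x:
--         cleaned_tup = tup.strip().split(",")
--         if len(cleaned_tup) >= 2:
--             typ = cleaned_tup[1]
--             if (("GPE" in typ and "Boston" not in cleaned_tup[0] and "Massachusetts" not in cleaned_tup[0])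
--                     or "ORG" in typ or "FAC" in typ or "LOC" in typ):
--                 t = typ.strip()
--                 buckets[priority[t] - 1].append((cleaned_tup[0], t))
--     return buckets[0] + buckets[1] + buckets[2] + buckets[3]
-- ===== Notes on version B (the rewrite author's own statement) =====
-- stated objective: alternative
-- what changed: Replaces the filter-then-sort(key=priority) pass with a single pass that appends each kept tuple to one of four ordered buckets (FAC/ORG/LOC/GPE) and concatenates them, removing the sort entirely.
import Mathlib
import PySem

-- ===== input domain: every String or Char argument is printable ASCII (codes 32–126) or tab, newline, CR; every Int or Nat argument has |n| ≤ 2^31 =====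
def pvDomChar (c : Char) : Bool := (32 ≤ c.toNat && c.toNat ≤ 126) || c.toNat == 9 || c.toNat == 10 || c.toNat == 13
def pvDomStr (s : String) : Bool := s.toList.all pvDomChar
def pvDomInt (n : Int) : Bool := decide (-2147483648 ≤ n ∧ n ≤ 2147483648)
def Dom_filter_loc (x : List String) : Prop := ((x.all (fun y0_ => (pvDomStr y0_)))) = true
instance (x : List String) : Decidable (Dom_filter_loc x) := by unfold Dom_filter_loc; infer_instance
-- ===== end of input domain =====

-- B replaces A's filter-then-stable-sort(key=priority) with a single pass into four ordered
-- buckets (FAC/ORG/LOC/GPE) concatenated at the end (objective: alternative decomposition, no sort).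

-- ===== PORT A =====
-- tup.strip().split(",")  (split? is exact here since the separator "," is nonempty)
def pvParts (s : String) : List String := (PySem.Str.split? (PySem.Str.strip s) ",").getD []
-- the big keep condition, verbatim from both Pythons
def pvKeep (c0 c1 : String) : Bool :=
  (PySem.Str.isIn "GPE" c1 && !(PySem.Str.isIn "Boston" c0) && !(PySem.Str.isIn "Massachusetts" c0))
  || PySem.Str.isIn "ORG" c1 || PySem.Str.isIn "FAC" c1 || PySem.Str.isIn "LOC" c1
-- priority = {'FAC': 1, 'ORG': 2, 'LOC': 3, 'GPE': 4}  (same literal dict in A and in Source B)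
def pvPriority : PySem.Dict String Int :=
  PySem.Dict.ofList [("FAC", 1), ("ORG", 2), ("LOC", 3), ("GPE", 4)]

def filter_loc (x : List String) : List (String × String) :=
  let res := x.foldl (fun res tup =>
    let ct := pvParts tup
    if 2 ≤ ct.length then
      if pvKeep (PySem.List.pyGetD ct 0 "") (PySem.List.pyGetD ct 1 "") then
        res ++ [(PySem.List.pyGetD ct 0 "", PySem.Str.strip (PySem.List.pyGetD ct 1 ""))]
      else res
    else res) []
  -- sorted(res, key=lambda x: priority[x[1]]); get? = none is a KeyError, excluded by Pre_
  PySem.List.sorted res (fun p => (PySem.Dict.get? pvPriority p.2).getD 0)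

-- ===== PORT B =====
def filter_loc_alt (x : List String) : List (String × String) :=
  let bs := x.foldl
    (fun (bs : List (String × String) × List (String × String) ×
               List (String × String) × List (String × String)) tup =>
      let ct := pvParts tup
      if 2 ≤ ct.length then
        if pvKeep (PySem.List.pyGetD ct 0 "") (PySem.List.pyGetD ct 1 "") then
          let t := PySem.Str.strip (PySem.List.pyGetD ct 1 "")
          let e := (PySem.List.pyGetD ct 0 "", t)
          let k := (PySem.Dict.get? pvPriority t).getD 0
          if k = 1 then (bs.1 ++ [e], bs.2.1, bs.2.2.1, bs.2.2.2)
          else if k = 2 then (bs.1, bs.2.1 ++ [e], bs.2.2.1, bs.2.2.2)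
          else if k = 3 then (bs.1, bs.2.1, bs.2.2.1 ++ [e], bs.2.2.2)
          else if k = 4 then (bs.1, bs.2.1, bs.2.2.1, bs.2.2.2 ++ [e])
          else bs  -- get? = none: Python raises KeyError here; excluded by Pre_
        else bs
      else bs)
    ([], [], [], [])
  bs.1 ++ bs.2.1 ++ bs.2.2.1 ++ bs.2.2.2

-- ===== PRECONDITION & SPEC =====
-- Pre_ excludes exactly the inputs on which BOTH Pythons raise KeyError: a kept tuple whose
-- stripped second field is not literally one of FAC/ORG/LOC/GPE (e.g. "ORGS").
def Pre_filter_loc (x : List String) : Prop :=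
  ∀ s ∈ x, 2 ≤ (pvParts s).length →
    pvKeep (PySem.List.pyGetD (pvParts s) 0 "") (PySem.List.pyGetD (pvParts s) 1 "") = true →
    PySem.Str.strip (PySem.List.pyGetD (pvParts s) 1 "") ∈ (["FAC", "ORG", "LOC", "GPE"] : List String)
instance (x : List String) : Decidable (Pre_filter_loc x) := by unfold Pre_filter_loc; infer_instance

def pvWitness_filter_loc : List String := ["x,ORG", "Boston, GPE", " y , FAC ", "z, LOC, extra", "w"]

def Spec_filter_loc (x : List String) (out : List (String × String)) : Prop := out = filter_loc_alt x
instance (x : List String) (out : List (String × String)) : Decidable (Spec_filter_loc x out) := by unfold Spec_filter_loc; infer_instance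

-- ===== CLAIM (what is proved, stated in full; the proofs are below) =====
def Claim_equal_filter_loc : Prop := ∀ (x : List String), Dom_filter_loc x → Pre_filter_loc x → Spec_filter_loc x (filter_loc x)

-- ===== LEMMAS AND PROOFS =====

-- the sort key of A
def pvK (p : String × String) : Int := (PySem.Dict.get? pvPriority p.2).getD 0

-- the per-element contribution of the shared filtering step
def pvG (tup : String) : List (String × String) :=
  let ct := pvParts tup
  if 2 ≤ ct.length then
    if pvKeep (PySem.List.pyGetD ct 0 "") (PySem.List.pyGetD ct 1 "") then
      [(PySem.List.pyGetD ct 0 "", PySem.Str.strip (PySem.List.pyGetD ct 1 ""))]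
    else []
  else []

def pvKept (x : List String) : List (String × String) := x.flatMap pvG

def pvF (i : Int) (l : List (String × String)) : List (String × String) :=
  l.filter (fun e => decide (pvK e = i))

lemma pvA_res (x : List String) :
    x.foldl (fun res tup =>
      let ct := pvParts tup
      if 2 ≤ ct.length then
        if pvKeep (PySem.List.pyGetD ct 0 "") (PySem.List.pyGetD ct 1 "") then
          res ++ [(PySem.List.pyGetD ct 0 "", PySem.Str.strip (PySem.List.pyGetD ct 1 ""))]
        else res
      else res) [] = pvKept x := by
  have h : (fun (res : List (String × String)) tup =>
      let ct := pvParts tup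
      if 2 ≤ ct.length then
        if pvKeep (PySem.List.pyGetD ct 0 "") (PySem.List.pyGetD ct 1 "") then
          res ++ [(PySem.List.pyGetD ct 0 "", PySem.Str.strip (PySem.List.pyGetD ct 1 ""))]
        else res
      else res) = fun res tup => res ++ pvG tup := by
    funext res tup
    simp only [pvG]
    split_ifs <;> simp
  rw [h, PySem.List.foldl_append_eq_flatMap, pvKept]
  simp

-- B's fold maintains the four buckets as the key-filters of the kept prefix
lemma pvB_fold (l : List String) (b1 b2 b3 b4 : List (String × String)) :
    l.foldl
      (fun (bs : List (String × String) × List (String × String) ×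
                 List (String × String) × List (String × String)) tup =>
        let ct := pvParts tup
        if 2 ≤ ct.length then
          if pvKeep (PySem.List.pyGetD ct 0 "") (PySem.List.pyGetD ct 1 "") then
            let t := PySem.Str.strip (PySem.List.pyGetD ct 1 "")
            let e := (PySem.List.pyGetD ct 0 "", t)
            let k := (PySem.Dict.get? pvPriority t).getD 0
            if k = 1 then (bs.1 ++ [e], bs.2.1, bs.2.2.1, bs.2.2.2)
            else if k = 2 then (bs.1, bs.2.1 ++ [e], bs.2.2.1, bs.2.2.2)
            else if k = 3 then (bs.1, bs.2.1, bs.2.2.1 ++ [e], bs.2.2.2)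
            else if k = 4 then (bs.1, bs.2.1, bs.2.2.1, bs.2.2.2 ++ [e])
            else bs
          else bs
        else bs)
      (b1, b2, b3, b4)
    = (b1 ++ pvF 1 (pvKept l), b2 ++ pvF 2 (pvKept l),
       b3 ++ pvF 3 (pvKept l), b4 ++ pvF 4 (pvKept l)) := by
  induction l generalizing b1 b2 b3 b4 with
  | nil => simp [pvKept, pvF]
  | cons s l ih =>
    simp only [List.foldl_cons]
    have hkept : pvKept (s :: l) = pvG s ++ pvKept l := by simp [pvKept]
    by_cases h1 : 2 ≤ (pvParts s).length
    · by_cases h2 : pvKeep (PySem.List.pyGetD (pvParts s) 0 "")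
          (PySem.List.pyGetD (pvParts s) 1 "") = true
      · have hg : pvG s = [(PySem.List.pyGetD (pvParts s) 0 "",
            PySem.Str.strip (PySem.List.pyGetD (pvParts s) 1 ""))] := by
          simp [pvG, h1, h2]
        set e := (PySem.List.pyGetD (pvParts s) 0 "",
            PySem.Str.strip (PySem.List.pyGetD (pvParts s) 1 "")) with he
        have hk : (PySem.Dict.get? pvPriority
            (PySem.Str.strip (PySem.List.pyGetD (pvParts s) 1 ""))).getD 0 = pvK e := by
          simp [pvK, he]
        simp only [h1, h2, if_true, hk]
        by_cases k1 : pvK e = 1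
        · simp only [k1, if_true, ih]
          simp [hkept, hg, pvF, k1]
        · by_cases k2 : pvK e = 2
          · simp only [k2, if_true, ih]
            simp [hkept, hg, pvF, k2]
          · by_cases k3 : pvK e = 3
            · simp only [k3, if_true, ih]
              simp [hkept, hg, pvF, k3]
            · by_cases k4 : pvK e = 4
              · simp only [k4, if_true, ih]
                simp [hkept, hg, pvF, k4]
              · simp only [k1, k2, k3, k4, if_false, ih]
                simp [hkept, hg, pvF, k1, k2, k3, k4]
      · have hg : pvG s = [] := by simp [pvG, h1, h2]
        simp only [h1, if_true, h2]
        simp only [Bool.false_eq_true, if_false, ih]  -- h2 : ¬ (… = true)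
        simp [hkept, hg]
  
    · have hg : pvG s = [] := by simp [pvG, h1]
      simp only [h1, if_false, ih]
      simp [hkept, hg]

-- stable insertion into a block-sorted list: skip the not-before prefix, land before the rest
lemma pvInsertBy_append (before : (String × String) → (String × String) → Bool)
    (a : String × String) (P S : List (String × String))
    (hP : ∀ y ∈ P, before a y = false) (hS : ∀ y ∈ S, before a y = true) :
    PySem.List.insertBy before a (P ++ S) = P ++ a :: S := by
  induction P with
  | nil =>
    cases S with
    | nil => simp [PySem.List.insertBy]
    | cons s S' => simp [PySem.List.insertBy, hS s (by simp)]
  | cons p P' ih =>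
    simp only [List.cons_append, PySem.List.insertBy, hP p (by simp), Bool.false_eq_true,
      if_false]
    rw [ih (fun y hy => hP y (by simp [hy]))]

lemma pvMem_pvF {i : Int} {l : List (String × String)} {e : String × String}
    (h : e ∈ pvF i l) : pvK e = i := by
  simp [pvF] at h; exact h.2

-- the characterisation of A's stable sort when every key is in {1,2,3,4}
lemma pvSorted_eq_filters (l : List (String × String))
    (h : ∀ e ∈ l, pvK e = 1 ∨ pvK e = 2 ∨ pvK e = 3 ∨ pvK e = 4) :
    PySem.List.sorted l pvK = pvF 1 l ++ pvF 2 l ++ pvF 3 l ++ pvF 4 l := by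
  rw [PySem.List.sorted_eq_foldl_insertBy]
  induction l using List.reverseRecOn with
  | nil => simp [pvF]
  | append_singleton l a ih =>
    have hl : ∀ e ∈ l, pvK e = 1 ∨ pvK e = 2 ∨ pvK e = 3 ∨ pvK e = 4 :=
      fun e he => h e (by simp [he])
    have ha := h a (by simp)
    rw [List.foldl_append, List.foldl_cons, List.foldl_nil, ih hl]
    have hfilt : ∀ i : Int, pvF i (l ++ [a]) = pvF i l ++ (if pvK a = i then [a] else []) := by
      intro i; simp [pvF]; split_ifs <;> simp_all
    -- case on the key of a
    rcases ha with ha | ha | ha | ha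
    · have := pvInsertBy_append (fun p q => decide (pvK p < pvK q)) a
        (pvF 1 l) (pvF 2 l ++ pvF 3 l ++ pvF 4 l)
        (by intro y hy; have := pvMem_pvF hy; simp [ha, this])
        (by intro y hy
            simp only [List.mem_append] at hy
            rcases hy with (hy | hy) | hy <;>
              { have := pvMem_pvF hy; simp [ha, this] })
      simp only [List.append_assoc] at this ⊢
      rw [this]
      simp [hfilt, ha]
    · have := pvInsertBy_append (fun p q => decide (pvK p < pvK q)) a
        (pvF 1 l ++ pvF 2 l) (pvF 3 l ++ pvF 4 l)
        (by intro y hy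
            simp only [List.mem_append] at hy
            rcases hy with hy | hy <;> { have := pvMem_pvF hy; simp [ha, this] })
        (by intro y hy
            simp only [List.mem_append] at hy
            rcases hy with hy | hy <;> { have := pvMem_pvF hy; simp [ha, this] })
      rw [show pvF 1 l ++ pvF 2 l ++ pvF 3 l ++ pvF 4 l
          = (pvF 1 l ++ pvF 2 l) ++ (pvF 3 l ++ pvF 4 l) by simp, this]
      simp [hfilt, ha]
    · have := pvInsertBy_append (fun p q => decide (pvK p < pvK q)) a
        (pvF 1 l ++ pvF 2 l ++ pvF 3 l) (pvF 4 l)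
        (by intro y hy
            simp only [List.mem_append] at hy
            rcases hy with (hy | hy) | hy <;> { have := pvMem_pvF hy; simp [ha, this] })
        (by intro y hy; have := pvMem_pvF hy; simp [ha, this])
      rw [show pvF 1 l ++ pvF 2 l ++ pvF 3 l ++ pvF 4 l
          = (pvF 1 l ++ pvF 2 l ++ pvF 3 l) ++ pvF 4 l by simp, this]
      simp [hfilt, ha]
    · have := pvInsertBy_append (fun p q => decide (pvK p < pvK q)) a
        (pvF 1 l ++ pvF 2 l ++ pvF 3 l ++ pvF 4 l) []
        (by intro y hy
            simp only [List.mem_append] at hy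
            rcases hy with ((hy | hy) | hy) | hy <;>
              { have := pvMem_pvF hy; simp [ha, this] })
        (by intro y hy; simp at hy)
      rw [show pvF 1 l ++ pvF 2 l ++ pvF 3 l ++ pvF 4 l
          = (pvF 1 l ++ pvF 2 l ++ pvF 3 l ++ pvF 4 l) ++ [] by simp, this]
      simp [hfilt, ha]

-- Pre_ pins every kept key into {1,2,3,4}
lemma pvPre_keys {x : List String} (hpre : Pre_filter_loc x) :
    ∀ e ∈ pvKept x, pvK e = 1 ∨ pvK e = 2 ∨ pvK e = 3 ∨ pvK e = 4 := by
  intro e he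
  simp only [pvKept, List.mem_flatMap] at he
  obtain ⟨s, hs, hes⟩ := he
  simp only [pvG] at hes
  by_cases h1 : 2 ≤ (pvParts s).length
  · by_cases h2 : pvKeep (PySem.List.pyGetD (pvParts s) 0 "")
        (PySem.List.pyGetD (pvParts s) 1 "") = true
    · simp only [h1, h2, if_true, List.mem_singleton] at hes
      subst hes
      have := hpre s hs h1 h2
      simp only [List.mem_cons] at this
      rcases this with h | h | h | h | h
      · exact Or.inl (by simp only [pvK, h]; decide)
      · exact Or.inr (Or.inl (by simp only [pvK, h]; decide))
      · exact Or.inr (Or.inr (Or.inl (by simp only [pvK, h]; decide)))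
      · exact Or.inr (Or.inr (Or.inr (by simp only [pvK, h]; decide)))
      · simp at h
    · simp [h1, h2] at hes
  · simp [h1] at hes

-- ===== VERDICT (by name: the statement is the Claim_ definition above) =====
theorem filter_loc_spec : Claim_equal_filter_loc := by
  intro x _ hpre
  unfold Spec_filter_loc filter_loc filter_loc_alt
  rw [pvA_res, pvB_fold]
  simp only [List.nil_append]
  have : (fun p : String × String => (PySem.Dict.get? pvPriority p.2).getD 0) = pvK := by
    funext p; simp [pvK]
  rw [this, pvSorted_eq_filters (pvKept x) (pvPre_keys hpre)]
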